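-- pv_equiv track=rewrite | github.com/gosch/Katas-in-python | 2018/august/codesignal/longestDigitsPrefix.py | longestDigitsPrefix
-- ===== SOURCE A (Python) =====
-- def longestDigitsPrefix(inputString):
--     num = ''
--     biggest = ''
--     flag = False
--     for i in range(len(inputString)):
--         if inputString[i].isdigit():
--             if flag:
--                 num += str(inputString[i])
--             else:
--                 flag = True
--                 num = str(inputString[i])
--         else:
--             flag = False
--             num = ''
--
--         if len(num) > len(biggest):
--             biggest = num
--     return biggest
-- ===== SOURCE B (Python) =====
-- def longestDigitsPrefix(inputString):
--     # Two-pointer run extraction: jump over each maximal digit run in one slice.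
--     best = ''
--     i = 0
--     n = len(inputString)
--     while i < n:
--         if inputString[i].isdigit():
--             j = i + 1
--             while j < n and inputString[j].isdigit():
--                 j += 1
--             if j - i > len(best):
--                 best = inputString[i:j]
--             i = j
--         else:
--             i += 1
--     return best
-- ===== Notes on version B (the rewrite author's own statement) =====
-- stated objective: alternative
-- what changed: A is a per-character state machine carrying a current-run accumulator and a flag and updating the best on every character; B is a two-pointer scan that locates each maximal digit run, slices it out, and compares once per run.
import Mathlib
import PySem

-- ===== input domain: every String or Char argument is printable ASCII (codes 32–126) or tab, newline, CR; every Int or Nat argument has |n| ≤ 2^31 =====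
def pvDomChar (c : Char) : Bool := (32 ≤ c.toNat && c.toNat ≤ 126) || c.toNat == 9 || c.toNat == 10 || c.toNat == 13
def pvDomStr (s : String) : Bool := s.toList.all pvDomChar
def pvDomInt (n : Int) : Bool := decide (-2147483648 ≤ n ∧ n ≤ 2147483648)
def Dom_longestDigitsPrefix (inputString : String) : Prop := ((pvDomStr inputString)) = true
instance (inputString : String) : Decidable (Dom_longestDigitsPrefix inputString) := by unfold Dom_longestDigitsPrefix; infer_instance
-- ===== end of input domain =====

-- B is a two-pointer maximal-run scan instead of A's per-character state machine; same O(n) cost (objective: alternative).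

-- ===== PORT A =====
-- A's loop state: (num = current digit run, biggest = best so far, flag = inside a run).
def pvStepA (st : List Char × List Char × Bool) (c : Char) : List Char × List Char × Bool :=
  let (num, biggest, flag) := st
  let (num, flag) :=
    if PySem.Chars.isdigit c then
      if flag then (num ++ [c], flag) else ([c], true)
    else ([], false)
  let biggest := if num.length > biggest.length then num else biggest
  (num, biggest, flag)

def longestDigitsPrefix (inputString : String) : String :=
  String.ofList (inputString.toList.foldl pvStepA ([], [], false)).2.1

-- ===== PORT B =====
-- B's outer loop: at a digit, take the whole maximal run (inner j-loop = takeWhile),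
-- compare it once against best, and resume after the run.
def pvGoB : List Char → List Char → List Char
  | [], best => best
  | c :: cs, best =>
      if PySem.Chars.isdigit c then
        let run := c :: cs.takeWhile PySem.Chars.isdigit
        let rest := cs.dropWhile PySem.Chars.isdigit
        pvGoB rest (if run.length > best.length then run else best)
      else
        pvGoB cs best
  termination_by cs => cs.length
  decreasing_by
    · exact Nat.lt_succ_of_le (List.length_dropWhile_le _ _)
    · exact Nat.lt_succ_self _

def longestDigitsPrefix_alt (inputString : String) : String :=
  String.ofList (pvGoB inputString.toList [])

-- ===== PRECONDITION & SPEC =====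
def Spec_longestDigitsPrefix (inputString : String) (out : String) : Prop := out = longestDigitsPrefix_alt inputString
instance (inputString : String) (out : String) : Decidable (Spec_longestDigitsPrefix inputString out) := by unfold Spec_longestDigitsPrefix; infer_instance

-- ===== CLAIM (what is proved, stated in full; the proofs are below) =====
def Claim_equal_longestDigitsPrefix : Prop := ∀ (inputString : String), Dom_longestDigitsPrefix inputString → Spec_longestDigitsPrefix inputString (longestDigitsPrefix inputString)

-- ===== LEMMAS AND PROOFS =====

-- Running A's fold through a block of digits appends the block to the current run
-- and records it iff it beats the best; needs the invariant num ≠ [] ∧ |num| ≤ |biggest|.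
theorem pvFoldA_digits (ds : List Char) : ∀ (num biggest : List Char),
    (∀ d ∈ ds, PySem.Chars.isdigit d = true) → num ≠ [] → num.length ≤ biggest.length →
    ds.foldl pvStepA (num, biggest, true)
      = (num ++ ds, if (num ++ ds).length > biggest.length then num ++ ds else biggest, true) := by
  induction ds with
  | nil =>
      intro num biggest _ _ hle
      simp [List.foldl]
      omega
  | cons d ds ih =>
      intro num biggest hall hne hle
      have hd : PySem.Chars.isdigit d = true := hall d (List.mem_cons_self ..)
      have hall' : ∀ x ∈ ds, PySem.Chars.isdigit x = true := fun x hx => hall x (List.mem_cons_of_mem _ hx)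
      simp only [List.foldl, pvStepA, hd, if_true]
      by_cases h1 : (num ++ [d]).length > biggest.length
      · rw [if_pos h1]
        rw [ih (num ++ [d]) (num ++ [d]) hall' (by simp) (le_refl _)]
        by_cases h2 : ds = []
        · subst h2
          simp only [List.append_nil]
          rw [if_neg (lt_irrefl _), if_pos h1]
        · have hpos : 0 < ds.length := List.length_pos_iff.mpr h2
          have hgt : ((num ++ [d]) ++ ds).length > (num ++ [d]).length := by
            simp only [List.length_append, List.length_cons, List.length_nil]; omega
          have hgt' : (num ++ d :: ds).length > biggest.length := by
            simp only [List.length_append, List.length_cons, List.length_nil] at h1 ⊢; omega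
          rw [if_pos hgt, if_pos hgt']
          simp
      · rw [if_neg h1]
        rw [ih (num ++ [d]) biggest hall' (by simp) (by simp at h1 ⊢; omega)]
        simp [List.append_assoc]

-- A's fold from a fresh (empty-run) state computes B's run-by-run scan.
theorem pvFoldA_eq_goB_aux (n : Nat) : ∀ (cs : List Char), cs.length ≤ n → ∀ (biggest : List Char),
    (cs.foldl pvStepA ([], biggest, false)).2.1 = pvGoB cs biggest := by
  induction n with
  | zero =>
    intro cs hn biggest
    have : cs = [] := List.eq_nil_of_length_eq_zero (Nat.le_zero.mp hn)
    subst this; simp [pvGoB]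
  | succ n ih =>
    intro cs hn biggest
    match cs with
    | [] => simp [pvGoB]
    | c :: cs =>
      by_cases hc : PySem.Chars.isdigit c = true
      · rw [pvGoB, if_pos hc]
        set ds := cs.takeWhile PySem.Chars.isdigit with hds
        set rest := cs.dropWhile PySem.Chars.isdigit with hrest
        have hsplit : cs = ds ++ rest := (List.takeWhile_append_dropWhile ..).symm
        have hallds : ∀ d ∈ ds, PySem.Chars.isdigit d = true := fun d hd => List.mem_takeWhile_imp hd
        -- first step
        have hb1 : ([c] : List Char).length ≤ (if ([c] : List Char).length > biggest.length then [c] else biggest).length := by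
          split <;> omega
        simp only [List.foldl, pvStepA, hc, if_neg (Bool.false_ne_true), if_true]
        rw [hsplit, List.foldl_append]
        rw [pvFoldA_digits ds [c] _ hallds (by simp) hb1]
        have hrun : ([c] ++ ds : List Char) = c :: ds := by simp
        rw [hrun]
        -- collapse the nested best-update into a single comparison with biggest
        have hbig : (if (c :: ds).length > (if ([c] : List Char).length > biggest.length then [c] else biggest).length
              then c :: ds else (if ([c] : List Char).length > biggest.length then [c] else biggest))
            = (if (c :: ds).length > biggest.length then c :: ds else biggest) := by
          by_cases h0 : ([c] : List Char).length > biggest.length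
          · rw [if_pos h0]
            have hb0 : biggest.length = 0 := Nat.lt_one_iff.mp (by simpa using h0)
            by_cases hds0 : ds = []
            · rw [hds0]
              rw [if_neg (by simp), if_pos (by simp [hb0])]
            · have hpos : 0 < ds.length := List.length_pos_iff.mpr hds0
              rw [if_pos (by simp; omega), if_pos (by simp [hb0])]
          · rw [if_neg h0]
        rw [hbig]
        set big2 := if (c :: ds).length > biggest.length then c :: ds else biggest with hbig2
        -- now run the rest, whose head is not a digit (or rest is empty)
        match hr : rest with
        | [] => simp [pvGoB]
        | r :: rs =>
          have hrd : PySem.Chars.isdigit r = false := by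
            have h := List.head_dropWhile_not (p := PySem.Chars.isdigit) (l := cs)
            rw [← hrest] at h
            simpa using h (by simp)
          simp only [List.foldl, pvStepA, hrd, Bool.false_eq_true, if_false, List.length_nil]
          rw [if_neg (by omega)]
          rw [pvGoB, if_neg (by simp [hrd])]
          refine ih rs ?_ big2
          have hle := List.length_dropWhile_le (p := PySem.Chars.isdigit) (l := cs)
          rw [← hrest] at hle
          simp only [List.length_cons] at hn hle
          omega
      · rw [pvGoB, if_neg hc]
        simp only [List.foldl, pvStepA, hc, Bool.false_eq_true, if_false, List.length_nil]
        rw [if_neg (by omega)]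
        exact ih cs (by simp only [List.length_cons] at hn; omega) biggest

theorem pvFoldA_eq_goB (cs : List Char) (biggest : List Char) :
    (cs.foldl pvStepA ([], biggest, false)).2.1 = pvGoB cs biggest :=
  pvFoldA_eq_goB_aux cs.length cs (le_refl _) biggest

-- ===== VERDICT (by name: the statement is the Claim_ definition above) =====
theorem longestDigitsPrefix_spec : Claim_equal_longestDigitsPrefix := by
  intro s _
  unfold Spec_longestDigitsPrefix longestDigitsPrefix longestDigitsPrefix_alt
  rw [pvFoldA_eq_goB]
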